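-- pv_equiv track=rewrite | github.com/McHughes288/hqa_jukebox | data/streaming.py | maximize_split_size
-- ===== SOURCE A (Python) =====
-- def maximize_split_size(max_workers, batch_size):
--
--     if max_workers == 0:
--         return batch_size
--
--     for n in range(max_workers, 0, -1):
--         if batch_size % n == 0:
--             num_workers = n
--             break
--
--     return batch_size // num_workers
-- ===== SOURCE B (Python) =====
-- def maximize_split_size(max_workers, batch_size):
--     if max_workers == 0:
--         return batch_size
--     b = abs(batch_size)
--     if b == 0:
--         return 0
--     best = 1
--     i = 1
--     while i * i <= b:
--         if b % i == 0:
--             if i <= max_workers and best < i: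
--                 best = i
--             j = b // i
--             if j <= max_workers and best < j:
--                 best = j
--         i += 1
--     return batch_size // best
-- ===== Notes on version B (the rewrite author's own statement) =====
-- stated objective: faster
-- what changed: A scans all candidates from max_workers down to 1 testing divisibility (O(max_workers)); B enumerates divisor pairs (i, b//i) of abs(batch_size) up to its square root and keeps the largest divisor <= max_workers (O(sqrt(batch_size))).
import Mathlib
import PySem

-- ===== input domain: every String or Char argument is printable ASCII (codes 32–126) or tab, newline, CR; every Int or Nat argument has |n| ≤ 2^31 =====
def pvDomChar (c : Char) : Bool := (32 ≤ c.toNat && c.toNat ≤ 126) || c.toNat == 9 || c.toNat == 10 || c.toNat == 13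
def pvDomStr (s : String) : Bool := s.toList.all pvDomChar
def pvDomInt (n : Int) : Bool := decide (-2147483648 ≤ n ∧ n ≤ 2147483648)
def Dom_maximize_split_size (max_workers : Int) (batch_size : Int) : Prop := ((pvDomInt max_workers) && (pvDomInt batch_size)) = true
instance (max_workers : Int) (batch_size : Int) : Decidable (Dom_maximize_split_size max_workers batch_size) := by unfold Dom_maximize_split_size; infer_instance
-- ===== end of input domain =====

-- B replaces A's O(max_workers) countdown scan by enumerating divisor pairs of
-- |batch_size| up to its square root (objective: faster).

-- ===== PORT A =====
-- 'for n in range(max_workers, 0, -1): if batch_size % n == 0: num_workers = n; break'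
-- as the countdown recursion n = max_workers, max_workers-1, ..., 1 (range is lazy, the
-- loop breaks at the first divisor); none = the loop ends without binding num_workers
def msALoop (batch_size : Int) (n : Int) : Option Int :=
  if 0 < n then
    if PySem.Int.mod batch_size n == 0 then some n
    else msALoop batch_size (n - 1)
  else none
termination_by n.toNat

-- the 'none' branch is unreachable under Pre_ (for max_workers < 0 Python raises UnboundLocalError)
def maximize_split_size (max_workers : Int) (batch_size : Int) : Int :=
  if max_workers = 0 then batch_size
  else
    match msALoop batch_size max_workers with
    | some num_workers => PySem.Int.floordiv batch_size num_workers
    | none => 0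

-- ===== PORT B =====
-- the while-loop of Source B: i counts up while i*i <= b, best keeps the largest
-- divisor of b that is <= max_workers among the pairs (i, b//i) seen so far
def msAltLoop (max_workers : Int) (b : Int) (i : Int) (best : Int) : Int :=
  if h : i * i ≤ b then
    let best1 :=
      if PySem.Int.mod b i == 0 then
        let best' := if i ≤ max_workers ∧ best < i then i else best
        let j := PySem.Int.floordiv b i
        if j ≤ max_workers ∧ best' < j then j else best'
      else best
    msAltLoop max_workers b (i + 1) best1
  else best
termination_by (b + 1 - i).toNat
decreasing_by
  have hib : i ≤ b := by nlinarith [mul_self_nonneg i]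
  omega

def maximize_split_size_alt (max_workers : Int) (batch_size : Int) : Int :=
  if max_workers = 0 then batch_size
  else
    let b := |batch_size|
    if b = 0 then 0
    else PySem.Int.floordiv batch_size (msAltLoop max_workers b 1 1)

-- ===== PRECONDITION & SPEC =====
-- Pre_ excludes max_workers < 0, where A raises UnboundLocalError (empty countdown range).
def Pre_maximize_split_size (max_workers : Int) (batch_size : Int) : Prop :=
  0 ≤ max_workers
instance (max_workers : Int) (batch_size : Int) : Decidable (Pre_maximize_split_size max_workers batch_size) := by unfold Pre_maximize_split_size; infer_instance

def pvWitness_maximize_split_size : Int × Int := (4, 6)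

def Spec_maximize_split_size (max_workers : Int) (batch_size : Int) (out : Int) : Prop := out = maximize_split_size_alt max_workers batch_size
instance (max_workers : Int) (batch_size : Int) (out : Int) : Decidable (Spec_maximize_split_size max_workers batch_size out) := by unfold Spec_maximize_split_size; infer_instance

-- ===== CLAIM (what is proved, stated in full; the proofs are below) =====
def Claim_equal_maximize_split_size : Prop := ∀ (max_workers : Int) (batch_size : Int), Dom_maximize_split_size max_workers batch_size → Pre_maximize_split_size max_workers batch_size → Spec_maximize_split_size max_workers batch_size (maximize_split_size max_workers batch_size)

-- ===== LEMMAS AND PROOFS =====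

-- "d is the largest n with 1 ≤ n ≤ mw dividing v"
def IsBest (mw v d : Int) : Prop :=
  1 ≤ d ∧ d ≤ mw ∧ d ∣ v ∧ ∀ n, 1 ≤ n → n ≤ mw → n ∣ v → n ≤ d

theorem IsBest.unique {mw v d e : Int} (hd : IsBest mw v d) (he : IsBest mw v e) : d = e :=
  le_antisymm (he.2.2.2 d hd.1 hd.2.1 hd.2.2.1) (hd.2.2.2 e he.1 he.2.1 he.2.2.1)

-- A's countdown loop returns the largest divisor ≤ mw (stated for mw = k+1 ≥ 1)
theorem findA (v : Int) : ∀ k : Nat, ∃ d,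
    msALoop v ((k : Int) + 1) = some d ∧ IsBest ((k : Int) + 1) v d := by
  intro k
  induction k with
  | zero =>
    refine ⟨1, ?_, ?_⟩
    · rw [msALoop]
      simp
    · exact ⟨le_refl 1, le_refl 1, one_dvd v, fun n h1 h2 _ => h2⟩
  | succ k ih =>
    have hm : ((k + 1 : Nat) : Int) + 1 = ((k : Int) + 1) + 1 := by push_cast; ring
    rw [hm, msALoop, if_pos (show (0:Int) < (k : Int) + 1 + 1 by omega)]
    by_cases hp : PySem.Int.mod v ((k : Int) + 1 + 1) = 0
    · refine ⟨(k : Int) + 1 + 1, ?_, ?_⟩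
      · simp [hp]
      · exact ⟨by omega, le_refl _, (PySem.Int.mod_eq_zero_iff_dvd v _).mp hp,
          fun n _ h2 _ => h2⟩
    · obtain ⟨d, hfind, hbest⟩ := ih
      obtain ⟨hd1, hdm, hddvd, hdmax⟩ := hbest
      have hmodf : (PySem.Int.mod v ((k : Int) + 1 + 1) == 0) = false := by
        simpa using hp
      have hsub : (k : Int) + 1 + 1 - 1 = (k : Int) + 1 := by ring
      refine ⟨d, ?_, ?_⟩
      · rw [hmodf]; simp only [Bool.false_eq_true, if_false, hsub, hfind]
      · refine ⟨hd1, by omega, hddvd, fun n h1 h2 hdvd => ?_⟩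
        rcases lt_or_eq_of_le h2 with h2' | h2'
        · exact hdmax n h1 (by omega) hdvd
        · exact absurd ((PySem.Int.mod_eq_zero_iff_dvd v n).mpr hdvd)
            (by rw [h2']; exact hp)

-- basic facts about a divisor d of b > 0
theorem codvd {b d : Int} (hb : 0 < b) (h1 : 1 ≤ d) (hdvd : d ∣ b) :
    1 ≤ b / d ∧ (b / d) ∣ b ∧ d * (b / d) = b ∧ b / (b / d) = d := by
  have hmul : b / d * d = b := Int.ediv_mul_cancel hdvd
  have hdb : d ≤ b := Int.le_of_dvd hb hdvd
  have hge : 1 ≤ b / d := by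
    rw [Int.le_ediv_iff_mul_le (show (0:Int) < d by omega)]; omega
  refine ⟨hge, ⟨d, hmul.symm⟩, by rw [mul_comm d (b / d)]; exact hmul, ?_⟩
  have hq0 : b / d ≠ 0 := by omega
  calc b / (b / d) = (b / d * d) / (b / d) := by rw [hmul]
    _ = d := Int.mul_ediv_cancel_left d hq0

-- loop invariant for B's while-loop: best is a divisor of b in [1, mw], and any
-- admissible divisor d not yet dominated still has both d ≥ i and b/d ≥ i
theorem loopB (mw b : Int) (hmw : 1 ≤ mw) (hb : 0 < b) :
    ∀ i best, 1 ≤ i →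
    (1 ≤ best ∧ best ≤ mw ∧ best ∣ b ∧
      ∀ d, 1 ≤ d → d ≤ mw → d ∣ b → (d ≤ best ∨ (i ≤ d ∧ i ≤ b / d))) →
    IsBest mw b (msAltLoop mw b i best) := by
  intro i best hi hinv
  obtain ⟨hb1, hbmw, hbdvd, hcov⟩ := hinv
  rw [msAltLoop]
  by_cases h : i * i ≤ b
  · rw [dif_pos h]
    have hdivi : PySem.Int.floordiv b i = b / i :=
      PySem.Int.floordiv_eq_ediv_of_pos (by omega)
    by_cases hp : i ∣ b
    · have hmodt : (PySem.Int.mod b i == 0) = true := by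
        simpa using (PySem.Int.mod_eq_zero_iff_dvd b i).mpr hp
      rw [if_pos hmodt]
      simp only [hdivi]
      obtain ⟨hq1, hqdvd, hqmul, hqq⟩ := codvd hb hi hp
      show IsBest mw b (msAltLoop mw b (i + 1)
        (if b / i ≤ mw ∧ (if i ≤ mw ∧ best < i then i else best) < b / i then b / i
         else if i ≤ mw ∧ best < i then i else best))
      set b' := if i ≤ mw ∧ best < i then i else best with hb'
      set b2 := if b / i ≤ mw ∧ b' < b / i then b / i else b' with hb2
      have hb'1 : 1 ≤ b' := by rw [hb']; split_ifs <;> omega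
      have hb'mw : b' ≤ mw := by rw [hb']; split_ifs with hc <;> omega
      have hb'dvd : b' ∣ b := by rw [hb']; split_ifs; exacts [hp, hbdvd]
      have hbe' : best ≤ b' := by rw [hb']; split_ifs <;> omega
      have hb21 : 1 ≤ b2 := by rw [hb2]; split_ifs <;> omega
      have hb2mw : b2 ≤ mw := by rw [hb2]; split_ifs with hc <;> omega
      have hb2dvd : b2 ∣ b := by rw [hb2]; split_ifs; exacts [hqdvd, hb'dvd]
      have hbe2 : b' ≤ b2 := by rw [hb2]; split_ifs <;> omega
      have hcatch_i : i ≤ mw → i ≤ b2 := by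
        intro hc; rw [hb2, hb']; split_ifs <;> omega
      have hcatch_j : b / i ≤ mw → b / i ≤ b2 := by
        intro hc; rw [hb2]; split_ifs <;> omega
      refine loopB mw b hmw hb (i + 1) b2 (by omega) ⟨hb21, hb2mw, hb2dvd, ?_⟩
      intro d hd1 hdmw hddvd
      rcases hcov d hd1 hdmw hddvd with hdb | ⟨hdi, hdbi⟩
      · exact Or.inl (by omega)
      · obtain ⟨hr1, hrdvd, hrmul, hrr⟩ := codvd hb hd1 hddvd
        by_cases hdeq : d = i
        · exact Or.inl (by subst hdeq; exact hcatch_i hdmw)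
        · by_cases hceq : b / d = i
          · left
            have hjd : b / i = d := by rw [← hceq]; exact hrr
            have := hcatch_j (by rw [hjd]; exact hdmw)
            omega
          · exact Or.inr ⟨by omega, by omega⟩
    · have hmodf : (PySem.Int.mod b i == 0) = false := by
        simpa using fun hc => hp ((PySem.Int.mod_eq_zero_iff_dvd b i).mp hc)
      rw [if_neg (by simp [hmodf])]
      refine loopB mw b hmw hb (i + 1) best (by omega) ⟨hb1, hbmw, hbdvd, ?_⟩
      intro d hd1 hdmw hddvd
      rcases hcov d hd1 hdmw hddvd with hdb | ⟨hdi, hdbi⟩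
      · exact Or.inl hdb
      · obtain ⟨hr1, hrdvd, hrmul, hrr⟩ := codvd hb hd1 hddvd
        have hdeq : d ≠ i := fun hc => hp (hc ▸ hddvd)
        have hceq : b / d ≠ i := fun hc => hp (hc ▸ hrdvd)
        exact Or.inr ⟨by omega, by omega⟩
  · rw [dif_neg h]
    refine ⟨hb1, hbmw, hbdvd, fun d hd1 hdmw hddvd => ?_⟩
    rcases hcov d hd1 hdmw hddvd with hdb | ⟨hdi, hdbi⟩
    · exact hdb
    · exfalso
      obtain ⟨hq1, _, hqmul, _⟩ := codvd hb hd1 hddvd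
      have : i * i ≤ d * (b / d) := mul_le_mul hdi hdbi (by omega) (by omega)
      omega
termination_by i best => (b + 1 - i).toNat
decreasing_by
  all_goals
    have hib : i ≤ b := by nlinarith [mul_self_nonneg i]
    omega

theorem altLoop_isBest (mw b : Int) (hmw : 1 ≤ mw) (hb : 0 < b) :
    IsBest mw b (msAltLoop mw b 1 1) := by
  refine loopB mw b hmw hb 1 1 (le_refl 1)
    ⟨le_refl 1, hmw, one_dvd b, fun d hd1 hdmw hddvd => ?_⟩
  exact Or.inr ⟨hd1, (codvd hb hd1 hddvd).1⟩

-- ===== VERDICT (by name: the statement is the Claim_ definition above) =====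
theorem maximize_split_size_spec : Claim_equal_maximize_split_size := by
  intro mw v _ hpre
  unfold Spec_maximize_split_size maximize_split_size maximize_split_size_alt
  by_cases h0 : mw = 0
  · simp [h0]
  · rw [if_neg h0, if_neg h0]
    have hmw : 1 ≤ mw := by
      have : (0:Int) ≤ mw := hpre
      omega
    obtain ⟨d, hfind, hbest⟩ := findA v (mw - 1).toNat
    have hcast : ((mw - 1).toNat : Int) + 1 = mw := by omega
    rw [hcast] at hfind hbest
    obtain ⟨hd1, hdm, hddvd, hdmax⟩ := hbest
    rw [hfind]
    show PySem.Int.floordiv v d = _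
    by_cases hv : v = 0
    · subst hv
      rw [PySem.Int.floordiv_eq_ediv_of_pos (show (0:Int) < d by omega)]
      norm_num
    · have habs : (0:Int) < |v| := abs_pos.mpr hv
      show _ = (let b := |v|; if b = 0 then 0 else PySem.Int.floordiv v (msAltLoop mw b 1 1))
      rw [if_neg (by omega)]
      have hbestB := altLoop_isBest mw |v| hmw habs
      have hde : d = msAltLoop mw |v| 1 1 := by
        refine IsBest.unique ?_ hbestB
        exact ⟨hd1, hdm, (dvd_abs d v).mpr hddvd,
          fun n hn1 hn2 hndvd => hdmax n hn1 hn2 ((dvd_abs n v).mp hndvd)⟩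
      rw [hde]
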